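-- pv_equiv track=rewrite | github.com/PoweredDeveloper/Learnix | bot/tg_bot/handlers/common.py | _split_plain_for_messages
-- ===== SOURCE A (Python) =====
-- TG_CAP = 4096
--
-- def _chunks(text: str, limit: int = TG_CAP) -> list[str]:
--     if not text:
--         return [""]
--     return [text[i : i + limit] for i in range(0, len(text), limit)]
--
-- def _split_plain_for_messages(plain: str, max_len: int = TG_CAP) -> list[str]:
--     """Merge paragraphs into Telegram-sized chunks without cutting mid-paragraph when possible."""
--     plain = plain.strip()
--     if not plain:
--         return []
--     paras = [p.strip() for p in plain.split("\n\n") if p.strip()]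
--     if not paras:
--         return [plain] if len(plain) <= max_len else _chunks(plain, max_len)
--     out: list[str] = []
--     buf: list[str] = []
--     buf_len = 0
--     for p in paras:
--         sep = 2 if buf else 0
--         if buf_len + sep + len(p) > max_len and buf:
--             out.append("\n\n".join(buf))
--             buf = [p]
--             buf_len = len(p)
--         else:
--             buf.append(p)
--             buf_len += sep + len(p)
--     if buf:
--         out.append("\n\n".join(buf))
--     final: list[str] = []
--     for ch in out:
--         if len(ch) <= max_len:
--             final.append(ch)
--         else:
--             final.extend(_chunks(ch, max_len))
--     return final
-- ===== SOURCE B (Python) =====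
-- TG_CAP = 4096
--
-- def _split_plain_for_messages(plain: str, max_len: int = TG_CAP) -> list[str]:
--     """Merge paragraphs into Telegram-sized chunks without cutting mid-paragraph when possible."""
--     paras = [p.strip() for p in plain.strip().split("\n\n") if p.strip()]
--     n = len(paras)
--     # prefix sums: cum[j] - cum[i] - 2 == len("\n\n".join(paras[i:j])) for i < j
--     cum = [0]
--     total = 0
--     for p in paras:
--         total += len(p) + 2
--         cum.append(total)
--     out: list[str] = []
--     i = 0
--     while i < n:
--         # largest j in [i+1, n] with the join of paras[i:j] within max_len (binary search);
--         # defaults to i+1, so a lone oversized paragraph forms its own group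
--         lo, hi = i + 1, n
--         while lo < hi:
--             mid = (lo + hi + 1) // 2
--             if cum[mid] - cum[i] - 2 <= max_len:
--                 lo = mid
--             else:
--                 hi = mid - 1
--         g = "\n\n".join(paras[i:lo])
--         if len(g) <= max_len:
--             out.append(g)
--         else:
--             k = -(-len(g) // max_len)  # ceil division; raises ZeroDivisionError if max_len == 0
--             out.extend(g[t * max_len : (t + 1) * max_len] for t in range(k))
--         i = lo
--     return out
-- ===== Notes on version B (the rewrite author's own statement) =====
-- stated objective: alternative
-- what changed: A packs paragraphs one by one with a running buffer and buffer-length accumulator and then re-scans the produced list to re-chunk oversized entries; B precomputes a prefix-sum array of paragraph lengths and finds each chunk boundary directly by binary search over it (largest j with cum[j]-cum[i]-2 <= max_len), emitting each group (ceil-division slicing when oversized) as it goes - no running buffer, no intermediate out list, no dead 'if not paras' branch.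
import Mathlib
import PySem

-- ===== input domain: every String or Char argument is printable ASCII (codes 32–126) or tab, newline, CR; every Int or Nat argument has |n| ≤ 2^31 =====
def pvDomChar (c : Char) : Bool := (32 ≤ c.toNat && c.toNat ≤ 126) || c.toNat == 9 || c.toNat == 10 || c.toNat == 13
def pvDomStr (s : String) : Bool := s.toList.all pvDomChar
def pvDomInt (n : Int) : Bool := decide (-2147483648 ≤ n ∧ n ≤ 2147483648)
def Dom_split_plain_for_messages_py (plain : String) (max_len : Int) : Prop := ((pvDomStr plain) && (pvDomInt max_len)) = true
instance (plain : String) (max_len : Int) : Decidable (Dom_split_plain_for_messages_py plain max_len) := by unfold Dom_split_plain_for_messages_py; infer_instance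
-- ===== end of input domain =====

-- B replaces A's running-buffer greedy packing plus second re-chunking sweep by a prefix-sum
-- array over paragraph lengths with a binary search for each chunk boundary, emitting groups
-- (ceil-division slicing when oversized) directly; objective: alternative algorithm (no speed claim).
-- Ports work on List Char (PySem.Chars is the definitional layer for Python str).

-- ===== PORT A =====
def pvChunksA (text : List Char) (limit : Int) : List (List Char) :=
  if text = [] then [[]]
  else (PySem.List.pyRange 0 (PySem.Chars.len text) limit).map
    (fun i => PySem.List.slice text (some i) (some (i + limit)))

-- one iteration of A's packing loop over state (out, buf, buf_len)
def pvStepA (max_len : Int) (st : List (List Char) × List (List Char) × Int) (p : List Char) :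
    List (List Char) × List (List Char) × Int :=
  let sep : Int := if st.2.1 ≠ [] then 2 else 0
  if st.2.2 + sep + PySem.Chars.len p > max_len ∧ st.2.1 ≠ [] then
    (st.1 ++ [PySem.Chars.join ['\n', '\n'] st.2.1], [p], PySem.Chars.len p)
  else
    (st.1, st.2.1 ++ [p], st.2.2 + sep + PySem.Chars.len p)

-- A's second loop: `final = []; for ch in out: append / extend(_chunks(ch))`
def pvPost (max_len : Int) (out : List (List Char)) : List (List Char) :=
  out.foldl (fun final ch =>
    if PySem.Chars.len ch ≤ max_len then final ++ [ch] else final ++ pvChunksA ch max_len) []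

def pvA (plain0 : List Char) (max_len : Int) : List (List Char) :=
  let plain := PySem.Chars.strip plain0
  if plain = [] then []
  else
    let paras := ((PySem.Chars.splitOn plain ['\n', '\n']).map PySem.Chars.strip).filter (· ≠ [])
    if paras = [] then
      (if PySem.Chars.len plain ≤ max_len then [plain] else pvChunksA plain max_len)
    else
      let st := paras.foldl (pvStepA max_len) ([], [], 0)
      let out := if st.2.1 ≠ [] then st.1 ++ [PySem.Chars.join ['\n', '\n'] st.2.1] else st.1
      pvPost max_len out

def split_plain_for_messages_py (plain : String) (max_len : Int) : List String :=
  (pvA plain.toList max_len).map String.ofList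

-- ===== PORT B =====
-- `cum = [0]; total = 0; for p in paras: total += len(p)+2; cum.append(total)`
def pvCum (paras : List (List Char)) : List Int × Int :=
  paras.foldl (fun st p =>
    let t := st.2 + PySem.Chars.len p + 2
    (st.1 ++ [t], t)) ([0], 0)

-- `cum[k]`; the index is in range at every call site, so the default is never read
def pvIdx (cum : List Int) (k : Int) : Int := (PySem.List.pyGet? cum k).getD 0

-- the inner `while lo < hi` binary search; the fuel passed in bounds its iteration count
def pvBSearch (cum : List Int) (base M : Int) : Nat → Int → Int → Int
  | 0, lo, _ => lo
  | fuel + 1, lo, hi =>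
    if lo < hi then
      let mid := PySem.Int.floordiv (lo + hi + 1) 2
      if pvIdx cum mid - base - 2 ≤ M then pvBSearch cum base M fuel mid hi
      else pvBSearch cum base M fuel lo (mid - 1)
    else lo

-- `k = -(-len(g) // max_len); [g[t*max_len:(t+1)*max_len] for t in range(k)]`
def pvChunkB (g : List Char) (M : Int) : List (List Char) :=
  let k := -(PySem.Int.floordiv (-(PySem.Chars.len g)) M)
  (List.range k.toNat).map fun (t : Nat) =>
    PySem.List.slice g (some ((t : Int) * M)) (some (((t : Int) + 1) * M))

-- the outer `while i < n` loop; each final chunk is emitted as it is produced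
def pvGroupsGo (paras : List (List Char)) (cum : List Int) (M : Int) :
    Nat → Int → List (List Char)
  | 0, _ => []
  | fuel + 1, i =>
    if i < (paras.length : Int) then
      let j := pvBSearch cum (pvIdx cum i) M (paras.length + 1) (i + 1) (paras.length : Int)
      let g := PySem.Chars.join ['\n', '\n'] (PySem.List.slice paras (some i) (some j))
      (if PySem.Chars.len g ≤ M then [g] else pvChunkB g M) ++ pvGroupsGo paras cum M fuel j
    else []

def pvB (plain : List Char) (M : Int) : List (List Char) :=
  let paras := ((PySem.Chars.splitOn (PySem.Chars.strip plain) ['\n', '\n']).map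
    PySem.Chars.strip).filter (· ≠ [])
  pvGroupsGo paras (pvCum paras).1 M (paras.length + 1) 0

def split_plain_for_messages_py_alt (plain : String) (max_len : Int) : List String :=
  (pvB plain.toList max_len).map String.ofList

-- ===== PRECONDITION & SPEC =====
-- Pre_ excludes only max_len = 0 on inputs with actual text: there A raises ValueError
-- (range() with step 0) and B raises ZeroDivisionError, so neither returns a value.
def Pre_split_plain_for_messages_py (plain : String) (max_len : Int) : Prop :=
  max_len ≠ 0 ∨ PySem.Chars.strip plain.toList = []
instance (plain : String) (max_len : Int) : Decidable (Pre_split_plain_for_messages_py plain max_len) := by unfold Pre_split_plain_for_messages_py; infer_instance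

def pvWitness_split_plain_for_messages_py : String × Int := ("hello\n\nworld", 7)

def Spec_split_plain_for_messages_py (plain : String) (max_len : Int) (out : List String) : Prop := out = split_plain_for_messages_py_alt plain max_len
instance (plain : String) (max_len : Int) (out : List String) : Decidable (Spec_split_plain_for_messages_py plain max_len out) := by unfold Spec_split_plain_for_messages_py; infer_instance

-- ===== CLAIM (what is proved, stated in full; the proofs are below) =====
def Claim_equal_split_plain_for_messages_py : Prop := ∀ (plain : String) (max_len : Int), Dom_split_plain_for_messages_py plain max_len → Pre_split_plain_for_messages_py plain max_len → Spec_split_plain_for_messages_py plain max_len (split_plain_for_messages_py plain max_len)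

-- ===== LEMMAS AND PROOFS =====

lemma chars_len_eq (c : List Char) : PySem.Chars.len c = (c.length : Int) := rfl

-- prefix sums of paragraph costs: pvS paras j = Σ_{u<j} (len paras[u] + 2)
def pvS (paras : List (List Char)) (j : Nat) : Int :=
  ((paras.map (fun p => PySem.Chars.len p + 2)).take j).sum

lemma pvS_succ (paras : List (List Char)) (j : Nat) (h : j < paras.length) :
    pvS paras (j + 1) = pvS paras j + PySem.Chars.len paras[j] + 2 := by
  unfold pvS
  rw [List.take_add_one, List.sum_append]
  rw [List.getElem?_map, List.getElem?_eq_getElem h]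
  simp
  ring

lemma pvS_mono (paras : List (List Char)) {i j : Nat} (hij : i ≤ j) :
    pvS paras i ≤ pvS paras j := by
  unfold pvS
  rw [show j = i + (j - i) by omega, List.take_add, List.sum_append]
  have h0 : 0 ≤ (List.take (j - i) (List.drop i (paras.map (fun p => PySem.Chars.len p + 2)))).sum := by
    apply List.sum_nonneg
    intro x hx
    have hx' := List.mem_of_mem_drop (List.mem_of_mem_take hx)
    obtain ⟨p, _, rfl⟩ := List.mem_map.mp hx'
    have h1 : (0:Int) ≤ (p.length : Int) := by positivity
    simp [PySem.Chars.len]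
    omega
  omega

-- the running-total fold, with generalized accumulator
lemma cum_fold : ∀ (ps : List (List Char)) (c : List Int) (t : Int),
    ps.foldl (fun st p =>
      let t := st.2 + PySem.Chars.len p + 2
      (st.1 ++ [t], t)) (c, t) =
    (c ++ (List.range ps.length).map (fun k => t + pvS ps (k + 1)), t + pvS ps ps.length) := by
  intro ps
  induction ps with
  | nil => intro c t; simp [pvS]
  | cons p r ih =>
    intro c t
    rw [List.foldl_cons]
    dsimp only
    rw [ih]
    have hS1 : ∀ k, pvS (p :: r) (k + 1) = (PySem.Chars.len p + 2) + pvS r k := by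
      intro k
      simp [pvS]
    refine Prod.ext ?_ ?_
    · show c ++ [t + PySem.Chars.len p + 2] ++
        List.map (fun k => t + PySem.Chars.len p + 2 + pvS r (k + 1)) (List.range r.length) =
        c ++ List.map (fun k => t + pvS (p :: r) (k + 1)) (List.range (p :: r).length)
      rw [List.append_assoc, List.singleton_append,
        List.length_cons, List.range_succ_eq_map, List.map_cons, List.map_map]
      congr 1
      congr 1
      · rw [hS1 0]
        have h0 : pvS r 0 = 0 := by simp [pvS]
        rw [h0]
        ring
      · refine List.map_congr_left ?_
        intro k _
        show t + PySem.Chars.len p + 2 + pvS r (k + 1) = t + pvS (p :: r) (k + 1 + 1)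
        rw [hS1 (k+1)]
        ring
    · show t + PySem.Chars.len p + 2 + pvS r r.length = t + pvS (p :: r) (p :: r).length
      rw [List.length_cons, hS1]
      ring

-- the running-total fold builds exactly the prefix-sum table
lemma cum_eq (paras : List (List Char)) :
    (pvCum paras).1 = (List.range (paras.length + 1)).map (pvS paras) := by
  unfold pvCum
  rw [cum_fold]
  show [(0:Int)] ++ _ = _
  rw [List.singleton_append, List.range_succ_eq_map, List.map_cons, List.map_map]
  congr 1
  congr 1
  funext k
  simp [pvS, Function.comp]

lemma idx_cum (paras : List (List Char)) (j : Nat) (h : j ≤ paras.length) :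
    pvIdx (pvCum paras).1 (j : Int) = pvS paras j := by
  unfold pvIdx
  rw [cum_eq, PySem.List.pyGet?_natCast]
  rw [List.getElem?_map, List.getElem?_range (by omega)]
  rfl

-- join facts
lemma join_ne_nil (buf : List (List Char)) (h : buf ≠ []) (hall : ∀ b ∈ buf, b ≠ []) :
    PySem.Chars.join ['\n', '\n'] buf ≠ [] := by
  cases buf with
  | nil => exact absurd rfl h
  | cons x rest =>
    have hx : x ≠ [] := hall x (by simp)
    cases rest with
    | nil => simpa [PySem.Chars.join_singleton] using hx
    | cons y rest' =>
      rw [PySem.Chars.join_cons_cons]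
      simp [hx]

-- the binary search returns the stated greedy boundary
lemma bsearch_correct (cum : List Int) (base M : Int) :
    ∀ (fuel : Nat) (lo hi j : Int), lo ≤ j → j ≤ hi → (hi - lo).toNat < fuel →
      (∀ t, lo < t → t ≤ j → pvIdx cum t - base - 2 ≤ M) →
      (∀ t, j < t → t ≤ hi → ¬ (pvIdx cum t - base - 2 ≤ M)) →
      pvBSearch cum base M fuel lo hi = j := by
  intro fuel
  induction fuel with
  | zero => intro lo hi j h1 h2 h3 _ _; omega
  | succ f ih =>
    intro lo hi j h1 h2 h3 hyes hno
    rw [pvBSearch]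
    by_cases hlh : lo < hi
    · rw [if_pos hlh]
      set mid := PySem.Int.floordiv (lo + hi + 1) 2 with hmiddef
      have hed : mid = (lo + hi + 1) / 2 := by
        rw [hmiddef, PySem.Int.floordiv_eq_ediv_of_pos (by norm_num)]
      have hlomid : lo < mid := by rw [hed]; omega
      have hmidhi : mid ≤ hi := by rw [hed]; omega
      by_cases hc : pvIdx cum mid - base - 2 ≤ M
      · rw [if_pos hc]
        have hmj : mid ≤ j := by
          by_contra hmj
          exact hno mid (by omega) hmidhi hc
        exact ih mid hi j hmj h2 (by omega)
          (fun t ht1 ht2 => hyes t (by omega) ht2) hno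
      · rw [if_neg hc]
        have hjm : j < mid := by
          by_contra hjm
          exact hc (hyes mid hlomid (by omega))
        exact ih lo (mid - 1) j h1 (by omega) (by omega) hyes
          (fun t ht1 ht2 => hno t ht1 (by omega))
    · rw [if_neg hlh]
      omega

-- A's greedy loop, recast as structural recursion on the paragraph list
def pvGrp (M : Int) : List (List Char) → Int → List (List Char) → List (List Char)
  | buf, _, [] => [PySem.Chars.join ['\n', '\n'] buf]
  | buf, L, p :: r =>
    if L + 2 + PySem.Chars.len p ≤ M then pvGrp M (buf ++ [p]) (L + 2 + PySem.Chars.len p) r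
    else PySem.Chars.join ['\n', '\n'] buf :: pvGrp M [p] (PySem.Chars.len p) r

def pvTail (M : Int) : List (List Char) → List (List Char)
  | [] => []
  | q :: r => pvGrp M [q] (PySem.Chars.len q) r

-- how many further paragraphs the greedy buffer absorbs
def pvCnt (M : Int) : Int → List (List Char) → Nat
  | _, [] => 0
  | L, p :: r =>
    if L + 2 + PySem.Chars.len p ≤ M then pvCnt M (L + 2 + PySem.Chars.len p) r + 1 else 0

lemma foldA_eq_grp (M : Int) :
    ∀ (ps : List (List Char)) (out buf : List (List Char)) (L : Int), buf ≠ [] →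
      (let st := ps.foldl (pvStepA M) (out, buf, L);
       if st.2.1 ≠ [] then st.1 ++ [PySem.Chars.join ['\n', '\n'] st.2.1] else st.1) =
      out ++ pvGrp M buf L ps := by
  intro ps
  induction ps with
  | nil =>
    intro out buf L hb
    simp only [List.foldl_nil, pvGrp]
    rw [if_pos hb]
  | cons p r ih =>
    intro out buf L hb
    simp only [List.foldl_cons]
    rw [pvGrp]
    by_cases hc : L + 2 + PySem.Chars.len p ≤ M
    · rw [if_pos hc]
      have hstep : pvStepA M (out, buf, L) p = (out, buf ++ [p], L + 2 + PySem.Chars.len p) := by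
        unfold pvStepA
        dsimp only
        rw [if_pos hb]
        rw [if_neg (by rintro ⟨h1, _⟩; omega)]
      rw [hstep]
      exact ih out (buf ++ [p]) (L + 2 + PySem.Chars.len p) (by simp)
    · rw [if_neg hc]
      have hstep : pvStepA M (out, buf, L) p =
          (out ++ [PySem.Chars.join ['\n', '\n'] buf], [p], PySem.Chars.len p) := by
        unfold pvStepA
        dsimp only
        rw [if_pos hb]
        rw [if_pos ⟨by omega, hb⟩]
      rw [hstep]
      rw [ih (out ++ [PySem.Chars.join ['\n', '\n'] buf]) [p] (PySem.Chars.len p) (by simp)]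
      simp

lemma grp_take (M : Int) :
    ∀ (ps buf : List (List Char)) (L : Int),
      pvGrp M buf L ps =
        PySem.Chars.join ['\n', '\n'] (buf ++ ps.take (pvCnt M L ps)) ::
          pvTail M (ps.drop (pvCnt M L ps)) := by
  intro ps
  induction ps with
  | nil => intro buf L; simp [pvGrp, pvCnt, pvTail]
  | cons p r ih =>
    intro buf L
    rw [pvGrp, pvCnt]
    by_cases hc : L + 2 + PySem.Chars.len p ≤ M
    · rw [if_pos hc, if_pos hc, ih]
      simp
    · rw [if_neg hc, if_neg hc]
      simp only [List.take_zero, List.append_nil, List.drop_zero]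
      rw [pvTail]

-- the greedy count, characterised through the prefix sums
lemma cnt_char (paras : List (List Char)) (M : Int) (i : Nat) :
    ∀ (d m : Nat), i < m → m ≤ paras.length → paras.length - m ≤ d →
      (m + pvCnt M (pvS paras m - pvS paras i - 2) (paras.drop m) ≤ paras.length) ∧
      (∀ u, m < u → u ≤ m + pvCnt M (pvS paras m - pvS paras i - 2) (paras.drop m) →
        pvS paras u - pvS paras i - 2 ≤ M) ∧
      (m + pvCnt M (pvS paras m - pvS paras i - 2) (paras.drop m) < paras.length →
        M < pvS paras (m + pvCnt M (pvS paras m - pvS paras i - 2) (paras.drop m) + 1)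
          - pvS paras i - 2) := by
  intro d
  induction d with
  | zero =>
    intro m him hm hd
    have hm' : m = paras.length := by omega
    subst hm'
    simp [List.drop_length, pvCnt]
    omega
  | succ d ih =>
    intro m him hm hd
    by_cases hmn : m = paras.length
    · subst hmn
      simp [List.drop_length, pvCnt]
      omega
    · have hmlt : m < paras.length := by omega
      rw [List.drop_eq_getElem_cons hmlt, pvCnt]
      have hseed : pvS paras m - pvS paras i - 2 + 2 + PySem.Chars.len paras[m]
          = pvS paras (m + 1) - pvS paras i - 2 := by
        rw [pvS_succ paras m hmlt]
        ring
      by_cases hc : pvS paras m - pvS paras i - 2 + 2 + PySem.Chars.len paras[m] ≤ M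
      · rw [if_pos hc]
        rw [hseed]
        obtain ⟨ih1, ih2, ih3⟩ := ih (m + 1) (by omega) (by omega) (by omega)
        refine ⟨by omega, ?_, ?_⟩
        · intro u hu1 hu2
          by_cases hum : u = m + 1
          · subst hum
            rw [← hseed]
            exact hc
          · exact ih2 u (by omega) (by omega)
        · intro hlt
          have h3 := ih3 (by omega)
          rw [show m + (pvCnt M (pvS paras (m+1) - pvS paras i - 2) (paras.drop (m+1)) + 1) + 1
            = m + 1 + pvCnt M (pvS paras (m+1) - pvS paras i - 2) (paras.drop (m+1)) + 1 by omega]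
          exact h3
      · rw [if_neg hc]
        refine ⟨by omega, by omega, ?_⟩
        intro _
        rw [show m + 0 + 1 = m + 1 by omega, ← hseed]
        omega

-- the two emission shapes agree on every nonempty chunk when M ≠ 0
lemma chunk_eq (g : List Char) (M : Int) (hg : g ≠ []) (hM : M ≠ 0) :
    pvChunkB g M = pvChunksA g M := by
  have hL0 : 0 < PySem.Chars.len g := by
    rw [chars_len_eq]
    have hp := List.length_pos_of_ne_nil hg
    exact_mod_cast hp
  rcases lt_or_gt_of_ne hM with hMneg | hMpos
  · -- negative max_len: both sides are empty
    unfold pvChunksA pvChunkB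
    rw [if_neg hg]
    have hA : PySem.List.pyRange 0 (PySem.Chars.len g) M = [] := by
      unfold PySem.List.pyRange
      split_ifs <;> first | rfl | omega
    rw [hA, List.map_nil]
    have hfd : PySem.Int.floordiv (-(PySem.Chars.len g)) M
        = PySem.Int.floordiv (PySem.Chars.len g) (-M) := by
      have hnn := PySem.Int.floordiv_neg_neg (PySem.Chars.len g) (-M)
      simpa using hnn
    have hnn : 0 ≤ PySem.Int.floordiv (PySem.Chars.len g) (-M) := by
      rw [PySem.Int.floordiv_eq_ediv_of_pos (by omega)]
      exact Int.ediv_nonneg (by omega) (by omega)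
    have ht0 : (-(PySem.Int.floordiv (-(PySem.Chars.len g)) M)).toNat = 0 := by
      rw [hfd]; omega
    simp only [ht0, List.range_zero, List.map_nil]
  · -- positive max_len
    unfold pvChunksA pvChunkB
    rw [if_neg hg]
    rw [PySem.List.pyRange_of_pos 0 (PySem.Chars.len g) hMpos,
      if_pos (by omega : (0:Int) < PySem.Chars.len g)]
    have hq : -(PySem.Int.floordiv (-(PySem.Chars.len g)) M)
        = (PySem.Chars.len g - 0 + M - 1) / M := by
      rw [PySem.Int.neg_floordiv_neg_eq_iff_of_pos hMpos]
      constructor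
      · have h1 := Int.ediv_mul_le (PySem.Chars.len g - 0 + M - 1) (by omega : M ≠ 0)
        nlinarith [h1]
      · have h2 := Int.lt_ediv_add_one_mul_self (PySem.Chars.len g - 0 + M - 1) hMpos
        nlinarith [h2]
    simp only [hq, List.map_map]
    refine List.map_congr_left ?_
    intro t _
    show PySem.List.slice g (some ((t:Int) * M)) (some (((t:Int) + 1) * M))
      = PySem.List.slice g (some (0 + M * (t:Int))) (some (0 + M * (t:Int) + M))
    have e1 : (t : Int) * M = 0 + M * (t : Int) := by ring
    have e2 : ((t : Int) + 1) * M = 0 + M * (t : Int) + M := by ring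
    rw [e1, e2]

-- A's second loop, as a flatMap over the group list
lemma post_flat (M : Int) :
    ∀ (out : List (List Char)) (acc : List (List Char)),
      out.foldl (fun final ch =>
        if PySem.Chars.len ch ≤ M then final ++ [ch] else final ++ pvChunksA ch M) acc =
      acc ++ out.flatMap (fun ch =>
        if PySem.Chars.len ch ≤ M then [ch] else pvChunksA ch M) := by
  intro out
  induction out with
  | nil => intro acc; simp
  | cons ch rest ih =>
    intro acc
    rw [List.foldl_cons, ih, List.flatMap_cons]
    by_cases hc : PySem.Chars.len ch ≤ M
    · rw [if_pos hc, if_pos hc, List.append_assoc]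
    · rw [if_neg hc, if_neg hc, List.append_assoc]

-- the coupled main induction: A's tail of groups, post-processed, is B's outer loop
lemma tail_go (paras : List (List Char)) (M : Int) (hM : M ≠ 0)
    (hne : ∀ p ∈ paras, p ≠ []) :
    ∀ (fuel : Nat) (i : Nat), i ≤ paras.length → paras.length - i < fuel →
      pvPost M (pvTail M (paras.drop i)) =
        pvGroupsGo paras (pvCum paras).1 M fuel (i : Int) := by
  intro fuel
  induction fuel with
  | zero => intro i _ h; omega
  | succ fuel ih =>
    intro i hi hfuel
    by_cases hilt : i < paras.length
    · -- one group is produced on each side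
      rw [List.drop_eq_getElem_cons hilt, pvTail]
      have hseed : PySem.Chars.len paras[i] = pvS paras (i + 1) - pvS paras i - 2 := by
        rw [pvS_succ paras i hilt]
        ring
      rw [hseed, grp_take]
      set c := pvCnt M (pvS paras (i + 1) - pvS paras i - 2) (paras.drop (i + 1)) with hcdef
      obtain ⟨hc1, hc2, hc3⟩ := cnt_char paras M i (paras.length - (i + 1)) (i + 1)
        (by omega) (by omega) (by omega)
      rw [← hcdef] at hc1 hc2 hc3
      set j := i + 1 + c with hjdef
      have hgrp : [paras[i]] ++ (paras.drop (i + 1)).take c = (paras.drop i).take (c + 1) := by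
        rw [List.drop_eq_getElem_cons hilt, List.take_succ_cons]
        rfl
      have hdd : (paras.drop (i + 1)).drop c = paras.drop j := by
        rw [List.drop_drop]
      rw [hgrp, hdd]
      set g := PySem.Chars.join ['\n', '\n'] ((paras.drop i).take (c + 1)) with hgdef
      have hgne : g ≠ [] := by
        apply join_ne_nil
        · have hlen : ((paras.drop i).take (c + 1)).length = min (c + 1) (paras.length - i) := by
            simp
          intro h0
          rw [h0] at hlen
          simp at hlen
          omega
        · intro b hb
          exact hne b (List.mem_of_mem_drop (List.mem_of_mem_take hb))
      have hsearch : pvBSearch (pvCum paras).1 (pvIdx (pvCum paras).1 (i : Int)) M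
          (paras.length + 1) ((i : Int) + 1) (paras.length : Int) = (j : Int) := by
        apply bsearch_correct
        · omega
        · exact_mod_cast hc1
        · omega
        · intro t ht1 ht2
          rw [show t = ((t.toNat : Nat) : Int) by omega]
          rw [idx_cum paras t.toNat (by omega), idx_cum paras i hi]
          exact hc2 t.toNat (by omega) (by omega)
        · intro t ht1 ht2 hcon
          rw [show t = ((t.toNat : Nat) : Int) by omega] at hcon
          rw [idx_cum paras t.toNat (by omega), idx_cum paras i hi] at hcon
          have hjlt : j < paras.length := by omega
          have hmono := pvS_mono paras (i := j + 1) (j := t.toNat) (by omega)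
          have hgap := hc3 hjlt
          omega
      have hslice : PySem.List.slice paras (some (i : Int)) (some (j : Int))
          = (paras.drop i).take (c + 1) := by
        rw [PySem.List.slice_natCast]
        congr 1
        omega
      have hB : pvGroupsGo paras (pvCum paras).1 M (fuel + 1) (i : Int) =
          (if PySem.Chars.len g ≤ M then [g] else pvChunkB g M) ++
            pvGroupsGo paras (pvCum paras).1 M fuel (j : Int) := by
        rw [pvGroupsGo]
        rw [if_pos (show (i : Int) < (paras.length : Int) by exact_mod_cast hilt)]
        simp only [hsearch, hslice, ← hgdef]
      have hA : pvPost M (g :: pvTail M (paras.drop j)) =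
          (if PySem.Chars.len g ≤ M then [g] else pvChunksA g M) ++
            pvPost M (pvTail M (paras.drop j)) := by
        unfold pvPost
        rw [List.foldl_cons, post_flat, post_flat]
        by_cases hfit : PySem.Chars.len g ≤ M
        · rw [if_pos hfit, if_pos hfit]
          simp
        · rw [if_neg hfit, if_neg hfit]
          simp
      rw [hA, hB, chunk_eq g M hgne hM, ih j (by omega) (by omega)]
    · -- i = paras.length: both sides are empty
      have hieq : i = paras.length := by omega
      subst hieq
      rw [List.drop_length, pvTail, pvGroupsGo]
      rw [if_neg (by omega)]
      rfl

-- ===== deadness of A's `if not paras` branch =====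
lemma strip_eq_nil_imp_all_ws (cs : List Char) (h : PySem.Chars.strip cs = []) :
    ∀ c ∈ cs, PySem.Chars.isspace c = true := by
  intro c hc
  unfold PySem.Chars.strip PySem.Chars.rstrip PySem.Chars.lstrip at h
  have h1 : List.dropWhile PySem.Chars.isspace
      (List.dropWhile PySem.Chars.isspace cs).reverse = [] := by
    rwa [List.reverse_eq_nil_iff] at h
  have h2 := List.dropWhile_eq_nil_iff.mp h1
  have hsplit := List.takeWhile_append_dropWhile
    (p := PySem.Chars.isspace) (l := cs)
  rw [← hsplit] at hc
  rcases List.mem_append.mp hc with h3 | h4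
  · exact List.mem_takeWhile_imp h3
  · exact h2 c (List.mem_reverse.mpr h4)

lemma go_zero (cur : List Char) (acc : List (List Char)) (l : List Char) :
    PySem.Chars.splitOn.go ['\n', '\n'] 0 l cur acc = ((cur.reverse ++ l) :: acc).reverse := by
  simp [PySem.Chars.splitOn.go]

lemma go_nil (fuel : Nat) (cur : List Char) (acc : List (List Char)) :
    PySem.Chars.splitOn.go ['\n', '\n'] (fuel + 1) [] cur acc = (cur.reverse :: acc).reverse := by
  simp [PySem.Chars.splitOn.go]

lemma go_cons (fuel : Nat) (c : Char) (rest cur : List Char) (acc : List (List Char)) :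
    PySem.Chars.splitOn.go ['\n', '\n'] (fuel + 1) (c :: rest) cur acc =
      if (['\n', '\n'] : List Char).isPrefixOf (c :: rest) then
        PySem.Chars.splitOn.go ['\n', '\n'] fuel ((c :: rest).drop 2) [] (cur.reverse :: acc)
      else PySem.Chars.splitOn.go ['\n', '\n'] fuel rest (c :: cur) acc := by
  simp [PySem.Chars.splitOn.go]

lemma go_acc_mem :
    ∀ (fuel : Nat) (l cur : List Char) (acc : List (List Char)) (p : List Char), p ∈ acc →
      p ∈ PySem.Chars.splitOn.go ['\n', '\n'] fuel l cur acc := by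
  intro fuel
  induction fuel with
  | zero =>
    intro l cur acc p hp
    rw [go_zero]
    simp [hp]
  | succ n ih =>
    intro l cur acc p hp
    cases l with
    | nil => rw [go_nil]; simp [hp]
    | cons c rest =>
      rw [go_cons]
      by_cases hpre : (['\n', '\n'] : List Char).isPrefixOf (c :: rest)
      · rw [if_pos hpre]
        exact ih _ _ _ p (by simp [hp])
      · rw [if_neg hpre]
        exact ih _ _ _ p hp

lemma go_all_ws :
    ∀ (fuel : Nat) (l cur : List Char) (acc : List (List Char)),
      (∀ p ∈ PySem.Chars.splitOn.go ['\n', '\n'] fuel l cur acc,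
        ∀ c ∈ p, PySem.Chars.isspace c = true) →
      (∀ c ∈ cur, PySem.Chars.isspace c = true) ∧ (∀ c ∈ l, PySem.Chars.isspace c = true) := by
  intro fuel
  induction fuel with
  | zero =>
    intro l cur acc h
    rw [go_zero] at h
    have h1 := h (cur.reverse ++ l) (by simp)
    constructor
    · intro c hc; exact h1 c (by simp [hc])
    · intro c hc; exact h1 c (by simp [hc])
  | succ n ih =>
    intro l cur acc h
    cases l with
    | nil =>
      rw [go_nil] at h
      have h1 := h cur.reverse (by simp)
      exact ⟨fun c hc => h1 c (List.mem_reverse.mpr hc), by simp⟩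
    | cons c rest =>
      rw [go_cons] at h
      by_cases hpre : (['\n', '\n'] : List Char).isPrefixOf (c :: rest)
      · rw [if_pos hpre] at h
        obtain ⟨t, ht⟩ := List.isPrefixOf_iff_prefix.mp hpre
        have hc : c = '\n' := by
          have := congrArg (fun l => l.head?) ht
          simpa using this.symm
        have hrest : rest = '\n' :: t := by
          cases ht
          rfl
        have hdrop : (c :: rest).drop 2 = t := by rw [hrest]; rfl
        rw [hdrop] at h
        have ih' := ih t [] (cur.reverse :: acc) h
        have hcur : ∀ x ∈ cur, PySem.Chars.isspace x = true := by
          intro x hx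
          exact h cur.reverse (go_acc_mem n t [] _ _ (by simp)) x (List.mem_reverse.mpr hx)
        refine ⟨hcur, ?_⟩
        intro x hx
        rw [hrest, hc] at hx
        simp only [List.mem_cons] at hx
        rcases hx with rfl | rfl | hx
        · decide
        · decide
        · exact ih'.2 x hx
      · rw [if_neg hpre] at h
        have ih' := ih rest (c :: cur) acc h
        refine ⟨fun x hx => ih'.1 x (by simp [hx]), ?_⟩
        intro x hx
        simp only [List.mem_cons] at hx
        rcases hx with rfl | hx
        · exact ih'.1 x (by simp)
        · exact ih'.2 x hx

lemma paras_ne_nil (s : List Char) (hs : PySem.Chars.strip s ≠ []) :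
    ((PySem.Chars.splitOn (PySem.Chars.strip s) ['\n', '\n']).map PySem.Chars.strip).filter
      (· ≠ []) ≠ [] := by
  intro hfil
  have hall : ∀ piece ∈ PySem.Chars.splitOn (PySem.Chars.strip s) ['\n', '\n'],
      ∀ c ∈ piece, PySem.Chars.isspace c = true := by
    intro piece hpiece c hc
    have h1 := List.filter_eq_nil_iff.mp hfil (PySem.Chars.strip piece)
      (List.mem_map_of_mem hpiece)
    exact strip_eq_nil_imp_all_ws piece (by simpa using h1) c hc
  have hres := go_all_ws ((PySem.Chars.strip s).length + 1) (PySem.Chars.strip s) [] []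
    (by exact hall)
  have hsws : ∀ c ∈ PySem.Chars.strip s, PySem.Chars.isspace c = true := hres.2
  have hdne : List.dropWhile PySem.Chars.isspace s ≠ [] := by
    intro h0
    apply hs
    unfold PySem.Chars.strip PySem.Chars.rstrip PySem.Chars.lstrip
    rw [h0]
    rfl
  have hhead : PySem.Chars.isspace
      ((List.dropWhile PySem.Chars.isspace s).head hdne) = false :=
    List.head_dropWhile_not PySem.Chars.isspace hdne
  have hsplit : List.dropWhile PySem.Chars.isspace s = PySem.Chars.strip s
      ++ (List.takeWhile PySem.Chars.isspace (List.dropWhile PySem.Chars.isspace s).reverse).reverse := by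
    have h1 := congrArg List.reverse
      (List.takeWhile_append_dropWhile (p := PySem.Chars.isspace)
        (l := (List.dropWhile PySem.Chars.isspace s).reverse))
    rw [List.reverse_append, List.reverse_reverse] at h1
    exact h1.symm
  have hdws : ∀ x ∈ List.dropWhile PySem.Chars.isspace s, PySem.Chars.isspace x = true := by
    intro x hx
    rw [hsplit] at hx
    rcases List.mem_append.mp hx with h1 | h2
    · exact hsws x h1
    · exact List.mem_takeWhile_imp (List.mem_reverse.mp h2)
  rw [hdws _ (List.head_mem hdne)] at hhead
  simp at hhead

-- main chars-level equivalence
lemma pvA_eq_pvB (plain : List Char) (M : Int)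
    (hM : M ≠ 0 ∨ PySem.Chars.strip plain = []) : pvA plain M = pvB plain M := by
  unfold pvA pvB
  by_cases hnil : PySem.Chars.strip plain = []
  · rw [hnil]
    rw [show PySem.Chars.splitOn ([] : List Char) ['\n', '\n'] = [[]] from rfl]
    rw [show (([[]] : List (List Char)).map PySem.Chars.strip).filter (· ≠ []) = [] from rfl]
    rfl
  · have hM : M ≠ 0 := hM.resolve_right hnil
    rw [if_neg hnil]
    have hpar := paras_ne_nil plain hnil
    rw [if_neg hpar]
    set paras := ((PySem.Chars.splitOn (PySem.Chars.strip plain) ['\n', '\n']).map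
      PySem.Chars.strip).filter (· ≠ []) with hpdef
    have hne : ∀ p ∈ paras, p ≠ [] := by
      intro p hp
      simpa using (List.mem_filter.mp hp).2
    obtain ⟨p0, rest, hcons⟩ := List.exists_cons_of_ne_nil hpar
    dsimp only
    rw [hcons, List.foldl_cons]
    have hstep0 : pvStepA M ([], [], 0) p0 = ([], [p0], 0 + 0 + PySem.Chars.len p0) := by
      unfold pvStepA
      dsimp only
      rw [if_neg (by rintro ⟨_, hb⟩; exact hb rfl)]
      simp
    rw [hstep0]
    have hgrp := foldA_eq_grp M rest [] [p0] (0 + 0 + PySem.Chars.len p0) (by simp)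
    dsimp only at hgrp
    rw [hgrp]
    have hzz : (0 : Int) + 0 + PySem.Chars.len p0 = PySem.Chars.len p0 := by ring
    rw [hzz]
    have htail : pvGrp M [p0] (PySem.Chars.len p0) rest = pvTail M (paras.drop 0) := by
      rw [List.drop_zero, hcons, pvTail]
    rw [List.nil_append, htail]
    have hgo := tail_go paras M hM hne (paras.length + 1) 0 (by omega) (by omega)
    rw [Nat.cast_zero] at hgo
    rw [← hcons]
    exact hgo

-- ===== VERDICT (by name: the statement is the Claim_ definition above) =====
theorem split_plain_for_messages_py_spec : Claim_equal_split_plain_for_messages_py := by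
  intro plain max_len _hdom hpre
  unfold Spec_split_plain_for_messages_py split_plain_for_messages_py split_plain_for_messages_py_alt
  rw [pvA_eq_pvB plain.toList max_len hpre]
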